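-- pv_equiv track=rewrite | github.com/SrLozano/AlgorithmicChallenges | Python Challenges/minimumAmount/minimunAmount.py | calculateAmount
-- ===== SOURCE A (Python) =====
-- def calculateAmount(prices):
--     result = 0
--     arr_discount = [] #array of discounts that can be eligible
--     #for each element in price we decide wheter it can have a discount or not
--     for element_price in prices:
--         if len(arr_discount) != 0:
--             discount = min(arr_discount)
--         else: #Edge limit refering to a list of prices with just one element
--             discount = 0
--         if (element_price - discount) >= 0: #A discount can not create a negative price
--             result = result + (element_price - discount)
--         arr_discount.append(element_price)
--     return result
-- ===== SOURCE B (Python) =====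
-- def calculateAmount(prices):
--     # pass 1: for each position, the minimum of all strictly earlier prices (0 for the first)
--     mins = []
--     m = 0
--     for i, p in enumerate(prices):
--         mins.append(m)
--         m = p if i == 0 else min(m, p)
--     # pass 2: sum the discounted prices that stay non-negative
--     return sum(p - d for p, d in zip(prices, mins) if p - d >= 0)
-- ===== Notes on version B (the rewrite author's own statement) =====
-- stated objective: faster
-- what changed: Replaced A's single fold that rescans the growing prefix list with min() at every step by two staged passes: first build the list of prefix minima in one sweep, then sum the eligible discounted prices over the zip of prices with that list.
import Mathlib
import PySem

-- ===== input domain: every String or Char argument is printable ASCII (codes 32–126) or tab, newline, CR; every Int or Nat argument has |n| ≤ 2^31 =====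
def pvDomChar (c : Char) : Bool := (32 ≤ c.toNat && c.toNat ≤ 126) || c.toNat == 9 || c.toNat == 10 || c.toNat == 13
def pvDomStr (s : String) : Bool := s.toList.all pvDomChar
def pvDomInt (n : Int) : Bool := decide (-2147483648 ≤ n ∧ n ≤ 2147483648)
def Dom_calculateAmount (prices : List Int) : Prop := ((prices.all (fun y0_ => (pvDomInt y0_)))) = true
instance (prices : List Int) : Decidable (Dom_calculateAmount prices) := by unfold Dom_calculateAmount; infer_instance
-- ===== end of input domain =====

-- B replaces A's fold that rescans the prefix list with min() at each step by two staged
-- passes: build the prefix-minima list, then sum eligible discounts over the zip (faster).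

-- ===== PORT A =====
-- step: discount = min(arr_discount) if nonempty else 0; add p - discount if >= 0; append p
def calculateAmount (prices : List Int) : Int :=
  (prices.foldl
    (fun (st : Int × List Int) p =>
      let discount : Int :=
        if st.2.length ≠ 0 then (PySem.List.min? st.2 (fun x => x)).getD 0 else 0
      let result := if p - discount ≥ 0 then st.1 + (p - discount) else st.1
      (result, st.2 ++ [p]))
    (0, [])).1

-- ===== PORT B =====
-- pass 1 of Source B: mins[i] = minimum of strictly earlier prices (0 for the first element);
-- the Option tracks "i == 0" (none) versus the current m (some m).
def altPrefixMins : List Int → Option Int → List Int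
  | [], _ => []
  | p :: rest, none => 0 :: altPrefixMins rest (some p)
  | p :: rest, some m => m :: altPrefixMins rest (some (min m p))

-- pass 2 of Source B: sum(p - d for p, d in zip(prices, mins) if p - d >= 0)
def calculateAmount_alt (prices : List Int) : Int :=
  let mins := altPrefixMins prices none
  (((prices.zip mins).filter (fun pd => pd.1 - pd.2 ≥ 0)).map (fun pd => pd.1 - pd.2)).sum

-- ===== PRECONDITION & SPEC =====
def Spec_calculateAmount (prices : List Int) (out : Int) : Prop := out = calculateAmount_alt prices
instance (prices : List Int) (out : Int) : Decidable (Spec_calculateAmount prices out) := by unfold Spec_calculateAmount; infer_instance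

-- ===== CLAIM (what is proved, stated in full; the proofs are below) =====
def Claim_equal_calculateAmount : Prop := ∀ (prices : List Int), Dom_calculateAmount prices → Spec_calculateAmount prices (calculateAmount prices)

-- ===== LEMMAS AND PROOFS =====

-- common recursive form of the discounted sum, parameterised by the prior minimum
def gSum : List Int → Option Int → Int
  | [], _ => 0
  | p :: rest, none => (if p - 0 ≥ 0 then p - 0 else 0) + gSum rest (some p)
  | p :: rest, some m => (if p - m ≥ 0 then p - m else 0) + gSum rest (some (min m p))

-- B's two passes compute gSum
theorem alt_eq_gSum (prices : List Int) : ∀ m? : Option Int,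
    (((prices.zip (altPrefixMins prices m?)).filter (fun pd => pd.1 - pd.2 ≥ 0)).map
      (fun pd => pd.1 - pd.2)).sum = gSum prices m? := by
  induction prices with
  | nil => intro m?; cases m? <;> simp [altPrefixMins, gSum]
  | cons p rest ih =>
    intro m?
    cases m? with
    | none =>
      simp only [altPrefixMins, gSum]
      by_cases h : (0:Int) ≤ p <;> simp [h] <;> simpa [sub_nonneg] using ih (some p)
    | some m =>
      simp only [altPrefixMins, gSum]
      by_cases h : m ≤ p
      · simp [h]
        simpa [sub_nonneg] using ih (some m)
      · simp [h]
        simpa [sub_nonneg] using ih (some (min m p))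

-- A's fold computes r + gSum, with the prior minimum tied to min? of the prefix list
theorem a_fold_eq_gSum (prices : List Int) : ∀ (r : Int) (arr : List Int),
    (prices.foldl
      (fun (st : Int × List Int) p =>
        let discount : Int :=
          if st.2.length ≠ 0 then (PySem.List.min? st.2 (fun x => x)).getD 0 else 0
        let result := if p - discount ≥ 0 then st.1 + (p - discount) else st.1
        (result, st.2 ++ [p]))
      (r, arr)).1
    = r + gSum prices (PySem.List.min? arr (fun x => x)) := by
  induction prices with
  | nil => intro r arr; simp [gSum]
  | cons p rest ih =>
    intro r arr
    simp only [List.foldl_cons]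
    cases arr with
    | nil =>
      rw [ih]
      simp [PySem.List.min?, gSum]
      by_cases h : 0 ≤ p <;> simp [h, add_assoc]
    | cons x t =>
      rw [ih]
      simp [PySem.List.min?_id_cons, List.foldl_append, gSum]
      by_cases h : t.foldl min x ≤ p <;> simp [h, add_assoc]

-- ===== VERDICT (by name: the statement is the Claim_ definition above) =====
theorem calculateAmount_spec : Claim_equal_calculateAmount := by
  intro prices _
  show calculateAmount prices = calculateAmount_alt prices
  rw [calculateAmount, a_fold_eq_gSum]
  simp only [calculateAmount_alt, alt_eq_gSum, PySem.List.min?, List.foldl_nil, zero_add]
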